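-- pv_equiv track=rewrite | github.com/nocobase/skills | skills/nocobase-page-builder/mcp-server/src/nocobase_mcp/markup_parser.py | _auto_form_dsl
-- ===== SOURCE A (Python) =====
-- def _auto_form_dsl(fields: list[str]) -> str:
--     """Auto-generate fields DSL — pair fields side by side."""
--     lines = []
--     for i in range(0, len(fields), 2):
--         if i + 1 < len(fields):
--             lines.append(f"{fields[i]} | {fields[i+1]}")
--         else:
--             lines.append(fields[i])
--     return "\n".join(lines)
-- ===== SOURCE B (Python) =====
-- def _auto_form_dsl(fields: list[str]) -> str:
--     """Auto-generate fields DSL -- build the text in one stream with alternating separators."""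
--     out = ""
--     for i, f in enumerate(fields):
--         if i > 0:
--             out += " | " if i % 2 else "\n"
--         out += f
--     return out
-- ===== Notes on version B (the rewrite author's own statement) =====
-- stated objective: alternative
-- what changed: A builds a list of paired lines (index stride 2, pair-vs-lone branch) and joins them; B never forms lines or pairs at all: it streams every field into one output string, preceding each field by a separator chosen from its index parity (' | ' after an even position, ' ' after an odd one), so the grouping emerges from the alternating separators.
import Mathlib
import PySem

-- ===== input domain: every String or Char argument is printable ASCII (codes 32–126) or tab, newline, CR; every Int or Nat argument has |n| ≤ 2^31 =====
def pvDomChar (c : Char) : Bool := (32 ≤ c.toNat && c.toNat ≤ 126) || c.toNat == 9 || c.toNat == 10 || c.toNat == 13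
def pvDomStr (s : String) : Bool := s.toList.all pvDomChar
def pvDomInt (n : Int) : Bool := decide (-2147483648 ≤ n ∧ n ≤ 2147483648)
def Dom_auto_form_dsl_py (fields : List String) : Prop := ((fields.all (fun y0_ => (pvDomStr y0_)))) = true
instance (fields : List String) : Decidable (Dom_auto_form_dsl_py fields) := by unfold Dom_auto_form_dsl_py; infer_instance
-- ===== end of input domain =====

-- B drops A's line list and pair/lone branch: it streams every field into one output string,
-- preceded by a separator chosen from the index's parity (objective: alternative, same cost).

-- ===== PORT A =====
-- literal port: for i in range(0, len(fields), 2): append paired or lone line; "\n".join(lines)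
def auto_form_dsl_py (fields : List String) : String :=
  let lines := (PySem.List.pyRange 0 (fields.length : Int) 2).foldl
    (fun lines i =>
      if i + 1 < (fields.length : Int) then
        lines ++ [PySem.List.pyGetD fields i "" ++ " | " ++ PySem.List.pyGetD fields (i + 1) ""]
      else
        lines ++ [PySem.List.pyGetD fields i ""]) []
  PySem.Str.join "\n" lines

-- ===== PORT B =====
-- literal port of Source B: for i, f in enumerate(fields): if i > 0: out += ' | ' if i % 2 else '\n'; out += f
def auto_form_dsl_py_alt (fields : List String) : String :=
  (PySem.List.enumerate fields 0).foldl
    (fun out p =>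
      let out := if p.1 > 0 then
          out ++ (if PySem.Int.mod p.1 2 ≠ 0 then " | " else "\n")
        else out
      out ++ p.2) ""

-- ===== PRECONDITION & SPEC =====
def Spec_auto_form_dsl_py (fields : List String) (out : String) : Prop := out = auto_form_dsl_py_alt fields
instance (fields : List String) (out : String) : Decidable (Spec_auto_form_dsl_py fields out) := by unfold Spec_auto_form_dsl_py; infer_instance

-- ===== CLAIM (what is proved, stated in full; the proofs are below) =====
def Claim_equal_auto_form_dsl_py : Prop := ∀ (fields : List String), Dom_auto_form_dsl_py fields → Spec_auto_form_dsl_py fields (auto_form_dsl_py fields)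

-- ===== LEMMAS AND PROOFS =====

-- the line A builds for index i
def pvLineF (fields : List String) (i : Int) : String :=
  if i + 1 < (fields.length : Int) then
    PySem.List.pyGetD fields i "" ++ " | " ++ PySem.List.pyGetD fields (i + 1) ""
  else
    PySem.List.pyGetD fields i ""

-- the list of lines both programs describe, consuming two fields at a time
def pvPairLines : List String → List String
  | [] => []
  | [a] => [a]
  | a :: b :: rest => (a ++ " | " ++ b) :: pvPairLines rest

-- the text B's loop emits from (Nat) index k onward
def pvT : Nat → List String → String
  | _, [] => ""
  | k, f :: r =>
    (if 0 < k then (if k % 2 = 1 then " | " else "\n") else "") ++ f ++ pvT (k + 1) r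

theorem pvA_eq_join_map (fields : List String) :
    auto_form_dsl_py fields =
      PySem.Str.join "\n" ((PySem.List.pyRange 0 (fields.length : Int) 2).map (pvLineF fields)) := by
  unfold auto_form_dsl_py
  have h : ∀ (acc : List String) (l : List Int),
      l.foldl (fun lines i =>
        if i + 1 < (fields.length : Int) then
          lines ++ [PySem.List.pyGetD fields i "" ++ " | " ++ PySem.List.pyGetD fields (i + 1) ""]
        else
          lines ++ [PySem.List.pyGetD fields i ""]) acc
      = acc ++ l.map (pvLineF fields) := by
    intro acc l
    induction l generalizing acc with
    | nil => simp
    | cons x xs ih =>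
      simp only [List.foldl_cons, List.map_cons, ih, pvLineF]
      split <;> simp
  simp [h]

theorem pvRange2 (n : Nat) :
    PySem.List.pyRange 0 (n : Int) 2 =
      (List.range (((n : Int) + 1) / 2).toNat).map (fun k => ((2 * k : Nat) : Int)) := by
  rw [PySem.List.pyRange_of_pos 0 (n : Int) (by norm_num)]
  by_cases hn : 0 < n
  · simp only [if_pos (by exact_mod_cast hn : (0 : Int) < (n : Int))]
    rw [show ((n : Int) - 0 + 2 - 1) = ((n : Int) + 1) by ring]
    congr 1
    funext k; push_cast; ring
  · have h0 : n = 0 := by omega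
    subst h0
    simp

theorem pvLines_cons_cons (a b : String) (rest : List String) :
    (PySem.List.pyRange 0 ((a :: b :: rest).length : Int) 2).map (pvLineF (a :: b :: rest)) =
      (a ++ " | " ++ b) :: (PySem.List.pyRange 0 (rest.length : Int) 2).map (pvLineF rest) := by
  rw [pvRange2, pvRange2]
  simp only [List.length_cons]
  have hcount : (((rest.length + 1 + 1 : Nat) : Int) + 1) / 2 = ((((rest.length : Nat) : Int) + 1) / 2) + 1 := by
    push_cast; omega
  rw [hcount]
  rw [show ((((rest.length : Nat) : Int) + 1) / 2 + 1).toNat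
        = ((((rest.length : Nat) : Int) + 1) / 2).toNat + 1 by omega]
  rw [List.range_succ_eq_map]
  simp only [List.map_cons, List.map_map]
  congr 1
  · have h0 : ((2 * 0 : Nat) : Int) = 0 := by norm_num
    simp only [pvLineF, h0]
    rw [if_pos (by simp only [List.length_cons]; push_cast; omega)]
    rw [PySem.List.pyGetD_zero_cons]
    rw [show ((0 : Int) + 1) = ((1 : Nat) : Int) from rfl, PySem.List.pyGetD_natCast]
    rfl
  · apply List.map_congr_left
    intro k _
    simp only [Function.comp_apply]
    have h2 : ((2 * (Nat.succ k) : Nat) : Int) = ((2 * k + 2 : Nat) : Int) := by push_cast; ring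
    rw [h2]
    simp only [pvLineF]
    have hg1 : PySem.List.pyGetD (a :: b :: rest) ((2 * k + 2 : Nat) : Int) "" =
        PySem.List.pyGetD rest ((2 * k : Nat) : Int) "" := by
      rw [PySem.List.pyGetD_natCast, PySem.List.pyGetD_natCast]; rfl
    have hg2 : PySem.List.pyGetD (a :: b :: rest) (((2 * k + 2 : Nat) : Int) + 1) "" =
        PySem.List.pyGetD rest (((2 * k : Nat) : Int) + 1) "" := by
      rw [show (((2 * k + 2 : Nat) : Int) + 1) = ((2 * k + 3 : Nat) : Int) by push_cast; ring,
          show (((2 * k : Nat) : Int) + 1) = ((2 * k + 1 : Nat) : Int) by push_cast; ring,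
          PySem.List.pyGetD_natCast, PySem.List.pyGetD_natCast]
      rfl
    by_cases hc : ((2 * k : Nat) : Int) + 1 < (rest.length : Int)
    · rw [if_pos (by simp only [List.length_cons]; push_cast; omega), if_pos hc, hg1, hg2]
    · rw [if_neg (fun h => hc (by simp only [List.length_cons] at h; push_cast at h; omega)), if_neg hc, hg1]

theorem pvLines_eq : ∀ fields,
    (PySem.List.pyRange 0 (fields.length : Int) 2).map (pvLineF fields) = pvPairLines fields := by
  intro fields
  induction fields using pvPairLines.induct with
  | case1 =>
    rw [pvRange2]
    simp [pvPairLines]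
  | case2 x =>
    rw [pvRange2]
    simp only [List.length_cons, List.length_nil]
    rw [show (((0 + 1 : Nat) : Int) + 1) / 2 = 1 by norm_num]
    rw [show ((1 : Int)).toNat = 1 from rfl, List.range_one]
    simp only [List.map_singleton]
    simp only [pvLineF]
    rw [if_neg (by norm_num)]
    rw [show ((2 * 0 : Nat) : Int) = 0 from by norm_num, PySem.List.pyGetD_zero_cons]
    rfl
  | case3 a b rest ih =>
    rw [pvLines_cons_cons, ih]
    rfl

-- B's foldl over enumerate, started at Nat index k, appends exactly pvT k l
theorem pvB_foldl (l : List String) : ∀ (k : Nat) (s : String),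
    (PySem.List.enumerate l (k : Int)).foldl
      (fun out p =>
        let out := if p.1 > 0 then
            out ++ (if PySem.Int.mod p.1 2 ≠ 0 then " | " else "\n")
          else out
        out ++ p.2) s = s ++ pvT k l := by
  induction l with
  | nil => intro k s; simp [PySem.List.enumerate_nil, pvT]
  | cons f r ih =>
    intro k s
    rw [PySem.List.enumerate_cons, List.foldl_cons]
    rw [show ((k : Int) + 1) = ((k + 1 : Nat) : Int) by push_cast; ring]
    rw [ih]
    simp only [pvT]
    have hmod : PySem.Int.mod (k : Int) 2 = ((k % 2 : Nat) : Int) := by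
      simp only [PySem.Int.mod]
      rw [Int.fmod_eq_emod]
      omega
    by_cases hk : 0 < k
    · rw [if_pos hk]
      simp only [if_pos (by exact_mod_cast hk : (0 : Int) < (k : Int)), hmod]
      by_cases hp : k % 2 = 1
      · rw [if_pos hp, if_pos (by omega : ((k % 2 : Nat) : Int) ≠ 0)]
        simp [String.append_assoc]
      · rw [if_neg hp, if_neg (by omega : ¬ ((k % 2 : Nat) : Int) ≠ 0)]
        simp [String.append_assoc]
    · have hk0 : k = 0 := by omega
      subst hk0
      simp [String.append_assoc]

-- the emitted text only depends on the index's positivity and parity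
theorem pvT_parity : ∀ (l : List String) (m n : Nat), 0 < m → 0 < n → m % 2 = n % 2 →
    pvT m l = pvT n l := by
  intro l
  induction l with
  | nil => intro m n _ _ _; rfl
  | cons f r ih =>
    intro m n hm hn hp
    simp only [pvT, if_pos hm, if_pos hn, hp]
    rw [ih (m + 1) (n + 1) (by omega) (by omega) (by omega)]

theorem pvT_two (l : List String) :
    pvT 2 l = if l = [] then "" else "\n" ++ pvT 0 l := by
  cases l with
  | nil => rfl
  | cons f r =>
    simp only [pvT, if_pos (by norm_num : (0:Nat) < 2), if_neg (by norm_num : ¬ 2 % 2 = 1),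
      if_neg (by norm_num : ¬ (0:Nat) < 0)]
    rw [pvT_parity r 3 1 (by omega) (by omega) (by omega)]
    simp [String.append_assoc]

theorem pvPairLines_nil_iff (l : List String) : pvPairLines l = [] ↔ l = [] := by
  cases l with
  | nil => simp [pvPairLines]
  | cons a r => cases r <;> simp [pvPairLines]

theorem pvJoin_cons_cons (sep x y : String) (xs : List String) :
    PySem.Str.join sep (x :: y :: xs) = x ++ sep ++ PySem.Str.join sep (y :: xs) := by
  have h : (PySem.Str.join sep (x :: y :: xs)).toList = (x ++ sep ++ PySem.Str.join sep (y :: xs)).toList := by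
    simp [PySem.Str.toList_join, PySem.Chars.join_cons_cons]
  exact String.toList_inj.mp h

theorem pvJoin_singleton (sep x : String) : PySem.Str.join sep [x] = x := by
  have h : (PySem.Str.join sep [x]).toList = x.toList := by
    simp [PySem.Str.toList_join, PySem.Chars.join_singleton]
  exact String.toList_inj.mp h

theorem pvT_eq_join : ∀ (l : List String),
    pvT 0 l = PySem.Str.join "\n" (pvPairLines l) := by
  intro l
  induction l using pvPairLines.induct with
  | case1 => rfl
  | case2 a => simp [pvT, pvPairLines, pvJoin_singleton]
  | case3 a b rest ih =>
    have h0 : pvT 0 (a :: b :: rest) = a ++ " | " ++ b ++ pvT 2 rest := by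
      simp [pvT, String.append_assoc]
    rw [h0, pvT_two]
    simp only [pvPairLines]
    by_cases hr : rest = []
    · subst hr
      simp [pvPairLines, pvJoin_singleton]
    · rw [if_neg hr, ih]
      have hpl : pvPairLines rest ≠ [] := fun h => hr ((pvPairLines_nil_iff rest).1 h)
      obtain ⟨x, xs, hxx⟩ : ∃ x xs, pvPairLines rest = x :: xs := by
        cases h : pvPairLines rest with
        | nil => exact absurd h hpl
        | cons x xs => exact ⟨x, xs, rfl⟩
      rw [hxx, pvJoin_cons_cons]
      simp [String.append_assoc]

theorem pvMain : ∀ fields, auto_form_dsl_py fields = auto_form_dsl_py_alt fields := by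
  intro fields
  rw [pvA_eq_join_map, pvLines_eq]
  have h := pvB_foldl fields 0 ""
  simp only [Nat.cast_zero] at h
  rw [pvT_eq_join] at h
  unfold auto_form_dsl_py_alt
  rw [h]
  simp

-- ===== VERDICT (by name: the statement is the Claim_ definition above) =====
theorem auto_form_dsl_py_spec : Claim_equal_auto_form_dsl_py := by
  intro fields _
  unfold Spec_auto_form_dsl_py
  exact pvMain fields
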